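-- pv_equiv track=rewrite | github.com/sdr2002/drill_leetcode | Minimum Subarray.py | maxLoss
-- ===== SOURCE A (Python) =====
-- def maxLoss(pnls):
--     # subarr = argmin sum(subarr)
--
--     n = len(pnls)
--
--     ml_arr = [None for i in range(n)]
--     indi_arr = [None for i in range(n)]
--     indf_arr = list(range(n))
--
--     # get ml_arr, indi_arr, indf_arr
--     ml_arr[0] = pnls[0]; indi_arr[0] = 0; indf_arr[0] = 0;
--     for i in range(1,n):
--         x = pnls[i]
--         if ml_arr[i-1] < 0:
--             ml_arr[i] = x + ml_arr[i-1]
--             indi_arr[i] = indi_arr[i-1]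
--         else:
--             ml_arr[i] = x
--             indi_arr[i]  = i
--
--     # find min ml_arr and retrieve ind and indf
--     min_pnl = min_indi = min_indf = None
--     for i in range(n):
--         min_ml_i = ml_arr[i]
--         if min_pnl is None:
--             min_pnl  = min_ml_i
--             min_indi = indi_arr[i]
--             min_indf = i
--         elif min_pnl > min_ml_i:
--             min_pnl  = min_ml_i
--             min_indi = indi_arr[i]
--             min_indf = i
--         else:
--             pass
--
--     return min_pnl, min_indi, min_indf
-- ===== SOURCE B (Python) =====
-- def maxLoss(pnls):
--     # Single-pass Kadane for the minimum-sum subarray: no intermediate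
--     # arrays, no second scan. Raises IndexError on [] like the original.
--     cur = best = pnls[0]
--     cur_start = best_start = best_end = 0
--     for i in range(1, len(pnls)):
--         x = pnls[i]
--         if cur < 0:
--             cur += x
--         else:
--             cur = x
--             cur_start = i
--         if cur < best:
--             best = cur
--             best_start = cur_start
--             best_end = i
--     return best, best_start, best_end
-- ===== Notes on version B (the rewrite author's own statement) =====
-- stated objective: simpler
-- what changed: Replaces A's three intermediate arrays and second minimum-finding scan with a single-pass Kadane loop carrying (cur, cur_start, best, best_start, best_end).
-- outside the precondition, e.g. on maxLoss([]): A raises IndexError, B raises IndexError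
import Mathlib
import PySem

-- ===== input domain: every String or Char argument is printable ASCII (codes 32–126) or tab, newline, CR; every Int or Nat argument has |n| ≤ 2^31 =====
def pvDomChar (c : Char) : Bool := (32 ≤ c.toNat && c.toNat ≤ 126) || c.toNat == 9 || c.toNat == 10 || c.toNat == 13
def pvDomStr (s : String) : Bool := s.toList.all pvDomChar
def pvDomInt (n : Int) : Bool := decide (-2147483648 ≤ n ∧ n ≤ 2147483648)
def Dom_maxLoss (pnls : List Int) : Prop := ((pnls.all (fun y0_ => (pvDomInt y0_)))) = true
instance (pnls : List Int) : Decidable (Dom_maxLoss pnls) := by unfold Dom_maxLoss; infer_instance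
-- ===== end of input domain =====

-- B replaces A's three intermediate arrays and second scan by a one-pass Kadane loop (objective: simpler).

-- ===== PORT A =====
-- stage 1 of A: builds the (ml_arr[i], indi_arr[i]) entries for i = 1..n-1,
-- given the previous entry (prevMl, prevIndi) and the current index i.
def maxLossBuild (xs : List Int) (prevMl prevIndi i : Int) : List (Int × Int) :=
  match xs with
  | [] => []
  | x :: rest =>
      if prevMl < 0 then
        (x + prevMl, prevIndi) :: maxLossBuild rest (x + prevMl) prevIndi (i + 1)
      else
        (x, i) :: maxLossBuild rest x i (i + 1)

-- stage 2 of A: scan the entries (ml_arr[i], indi_arr[i]) at index i, keeping the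
-- strictly smaller ml (min_pnl > min_ml_i), accumulator (min_pnl, min_indi, min_indf).
def maxLossScan (entries : List (Int × Int)) (i : Int) (acc : Int × Int × Int) : Int × Int × Int :=
  match entries with
  | [] => acc
  | (ml, indi) :: rest =>
      if acc.1 > ml then maxLossScan rest (i + 1) (ml, indi, i)
      else maxLossScan rest (i + 1) acc

def maxLoss (pnls : List Int) : Int × Int × Int :=
  match pnls with
  | [] => (0, 0, 0)  -- Python raises IndexError on []; excluded by Pre_maxLoss
  | x :: xs => maxLossScan (maxLossBuild xs x 0 1) 1 (x, 0, 0)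

-- ===== PORT B =====
def maxLossKad (xs : List Int) (i : Int) (cur : Int × Int) (best : Int × Int × Int) : Int × Int × Int :=
  match xs with
  | [] => best
  | x :: rest =>
      let cur' := if cur.1 < 0 then (cur.1 + x, cur.2) else (x, i)
      let best' := if cur'.1 < best.1 then (cur'.1, cur'.2, i) else best
      maxLossKad rest (i + 1) cur' best'

def maxLoss_alt (pnls : List Int) : Int × Int × Int :=
  match pnls with
  | [] => (0, 0, 0)  -- Python raises IndexError on []; excluded by Pre_maxLoss
  | x :: xs => maxLossKad xs 1 (x, 0) (x, 0, 0)

-- ===== PRECONDITION & SPEC =====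
-- Pre_ excludes the empty list, on which both Pythons raise IndexError (pnls[0]).
def Pre_maxLoss (pnls : List Int) : Prop := pnls ≠ []
instance (pnls : List Int) : Decidable (Pre_maxLoss pnls) := by unfold Pre_maxLoss; infer_instance
def pvWitness_maxLoss : List Int := [3, -4, 2, -5, 1]

def Spec_maxLoss (pnls : List Int) (out : Int × Int × Int) : Prop := out = maxLoss_alt pnls
instance (pnls : List Int) (out : Int × Int × Int) : Decidable (Spec_maxLoss pnls out) := by unfold Spec_maxLoss; infer_instance

-- ===== CLAIM (what is proved, stated in full; the proofs are below) =====
def Claim_equal_maxLoss : Prop := ∀ (pnls : List Int), Dom_maxLoss pnls → Pre_maxLoss pnls → Spec_maxLoss pnls (maxLoss pnls)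

-- ===== LEMMAS AND PROOFS =====

-- scanning A's arrays as they are built is exactly Kadane's fused loop
theorem scan_build_eq_kad (xs : List Int) :
    ∀ (i prevMl prevIndi : Int) (acc : Int × Int × Int),
      maxLossScan (maxLossBuild xs prevMl prevIndi i) i acc
        = maxLossKad xs i (prevMl, prevIndi) acc := by
  induction xs with
  | nil => intro i prevMl prevIndi acc; rfl
  | cons x rest ih =>
      intro i prevMl prevIndi acc
      by_cases h : prevMl < 0
      · simp only [maxLossBuild, maxLossScan, maxLossKad, if_pos h]
        rw [Int.add_comm x prevMl] at *
        by_cases h2 : acc.1 > prevMl + x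
        · simp only [if_pos h2, ih]
        · simp only [if_neg h2, ih]
      · simp only [maxLossBuild, maxLossScan, maxLossKad, if_neg h]
        by_cases h2 : acc.1 > x
        · simp only [if_pos h2, ih]
        · simp only [if_neg h2, ih]

-- ===== VERDICT (by name: the statement is the Claim_ definition above) =====
theorem maxLoss_spec : Claim_equal_maxLoss := by
  intro pnls _ hpre
  unfold Spec_maxLoss
  cases pnls with
  | nil => exact absurd rfl hpre
  | cons x xs => simp [maxLoss, maxLoss_alt, scan_build_eq_kad]
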